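-- pv_equiv track=rewrite | github.com/chipturner/advent-of-code | 2022/src/day16.py | dfs
-- ===== SOURCE A (Python) =====
-- MINUTES_AVAILABLE = 26
--
-- def dfs(graph, valve_rates, visit_times, cur_node):
--     cur_time = visit_times[cur_node]
--     ret = [visit_times.copy()]
--     for nxt, nxt_time in graph[cur_node]:
--         if nxt not in visit_times and nxt_time + cur_time <= MINUTES_AVAILABLE:
--             visit_times[nxt] = nxt_time + cur_time + 1
--             ret.extend(dfs(graph, valve_rates, visit_times, nxt))
--             del visit_times[nxt]
--     return ret
-- ===== SOURCE B (Python) =====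
-- MINUTES_AVAILABLE = 26
--
-- def dfs(graph, valve_rates, visit_times, cur_node):
--     # Two-stage rewrite: enumerate suffix paths of (valve, open-time) pairs in
--     # pre-order with an immutable 'seen' set, then merge each path onto the
--     # original dict; no mutate/undo of visit_times.
--     def paths(node, now, seen):
--         return [[]] + [
--             [(nxt, cost + now + 1)] + rest
--             for nxt, cost in graph[node]
--             if nxt not in seen and cost + now <= MINUTES_AVAILABLE
--             for rest in paths(nxt, cost + now + 1, seen | {nxt})
--         ]
--     return [{**visit_times, **dict(p)}
--             for p in paths(cur_node, visit_times[cur_node], set(visit_times))]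
-- ===== Notes on version B (the rewrite author's own statement) =====
-- stated objective: alternative
-- what changed: A's single mutate-recurse-undo recursion over a shared dict is replaced by a two-stage design: a pure recursion over an immutable 'seen' set enumerating suffix paths of (valve, open-time) pairs in pre-order, followed by a separate pass merging each path onto the original dict.
import Mathlib
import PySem

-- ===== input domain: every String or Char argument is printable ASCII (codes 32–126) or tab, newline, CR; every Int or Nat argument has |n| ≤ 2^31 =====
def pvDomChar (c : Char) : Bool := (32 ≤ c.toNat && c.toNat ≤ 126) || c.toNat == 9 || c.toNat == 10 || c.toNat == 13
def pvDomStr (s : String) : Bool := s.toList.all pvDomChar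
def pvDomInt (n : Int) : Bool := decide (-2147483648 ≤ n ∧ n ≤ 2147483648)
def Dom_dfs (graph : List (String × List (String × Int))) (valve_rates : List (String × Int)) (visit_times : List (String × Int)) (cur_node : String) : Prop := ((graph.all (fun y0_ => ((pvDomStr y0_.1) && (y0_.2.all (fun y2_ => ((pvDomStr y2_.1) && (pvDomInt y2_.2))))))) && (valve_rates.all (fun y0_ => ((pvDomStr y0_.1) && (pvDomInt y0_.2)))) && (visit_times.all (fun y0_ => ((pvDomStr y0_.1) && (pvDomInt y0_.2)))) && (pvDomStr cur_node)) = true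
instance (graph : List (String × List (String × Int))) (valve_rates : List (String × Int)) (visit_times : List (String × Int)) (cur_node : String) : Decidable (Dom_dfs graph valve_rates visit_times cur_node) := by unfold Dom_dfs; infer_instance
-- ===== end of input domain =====

-- B replaces A's mutate/recurse/undo recursion on a shared dict by a two-stage
-- design: a pure path-enumerating recursion over an immutable 'seen' set,
-- followed by a pass merging each path onto the original dict (A restores
-- visit_times before returning, so the return value is the whole observable
-- behaviour).

-- ===== termination helpers (cited by the ports' decreasing_by) =====

-- all node names occurring in adjacency lists of the graph
def pvNames (graph : List (String × List (String × Int))) : List String :=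
  graph.flatMap (fun p => p.2.map Prod.fst)

-- A's measure: number of adjacency-list names not yet keys of the visit-times dict
def pvMeas (graph : List (String × List (String × Int))) (vt : List (String × Int)) : Nat :=
  ((pvNames graph).filter (fun s => (vt.lookup s).isNone)).length

-- B's measure: number of adjacency-list names not yet in the 'seen' set
def pvMeasB (graph : List (String × List (String × Int))) (seen : PySem.Set String) : Nat :=
  ((pvNames graph).filter (fun s => !(PySem.Set.contains seen s))).length

theorem pv_lookup_append_isNone (vt : List (String × Int)) (k s : String) (v : Int) :
    ((vt ++ [(k, v)]).lookup s).isNone = (((vt.lookup s).isNone) && !(s == k)) := by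
  induction vt with
  | nil => cases h : (s == k) <;> simp [List.lookup, h]
  | cons a t ih => cases a with
    | mk a1 a2 =>
      cases h : (s == a1) <;> simp [List.lookup, h, ih]

theorem pv_mem_adj_names (graph : List (String × List (String × Int))) (node : String)
    (q : String × Int) (hq : q ∈ (graph.lookup node).getD []) : q.1 ∈ pvNames graph := by
  induction graph with
  | nil => simp at hq
  | cons p t ih =>
    simp only [List.lookup] at hq
    unfold pvNames
    cases h : (node == p.1) with
    | true =>
      rw [h] at hq
      simp only [Option.getD_some] at hq
      exact List.mem_flatMap.mpr ⟨p, List.mem_cons_self .., List.mem_map_of_mem hq⟩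
    | false =>
      rw [h] at hq
      obtain ⟨l, hl, hm⟩ := List.mem_flatMap.mp (ih hq)
      exact List.mem_flatMap.mpr ⟨l, List.mem_cons_of_mem _ hl, hm⟩

theorem pvMeas_insert_lt (graph : List (String × List (String × Int)))
    (node : String) (vt : List (String × Int)) (q : String × Int) (v : Int)
    (hq : q ∈ (graph.lookup node).getD []) (hn : (vt.lookup q.1).isNone = true) :
    pvMeas graph (vt ++ [(q.1, v)]) < pvMeas graph vt := by
  unfold pvMeas
  have hfe : ((pvNames graph).filter (fun s => ((vt ++ [(q.1, v)]).lookup s).isNone))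
      = ((pvNames graph).filter (fun s => (vt.lookup s).isNone)).filter (fun s => !(s == q.1)) := by
    rw [List.filter_filter]
    apply List.filter_congr
    intro x _
    rw [pv_lookup_append_isNone]
    cases h1 : (vt.lookup x).isNone <;> cases h2 : (x == q.1) <;> simp
  rw [hfe]
  apply List.length_filter_lt_length_iff_exists.mpr
  refine ⟨q.1, ?_, by simp⟩
  simp only [List.mem_filter]
  exact ⟨pv_mem_adj_names graph node q hq, hn⟩

theorem pvMeasB_add_lt (graph : List (String × List (String × Int)))
    (node : String) (seen : PySem.Set String) (q : String × Int)
    (hq : q ∈ (graph.lookup node).getD []) (hn : PySem.Set.contains seen q.1 = false) :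
    pvMeasB graph (PySem.Set.add seen q.1) < pvMeasB graph seen := by
  have hnm : q.1 ∉ seen := by
    intro hmem
    rw [(PySem.Set.contains_iff seen q.1).mpr hmem] at hn
    exact Bool.false_ne_true hn.symm
  unfold pvMeasB
  rw [PySem.Set.add_of_not_mem hnm]
  have hfe : ((pvNames graph).filter (fun s => !(PySem.Set.contains (seen ++ [q.1]) s)))
      = ((pvNames graph).filter (fun s => !(PySem.Set.contains seen s))).filter (fun s => !(s == q.1)) := by
    rw [List.filter_filter]
    apply List.filter_congr
    intro x _
    have hca : PySem.Set.contains (seen ++ [q.1]) x = (seen.contains x || x == q.1) := by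
      simp [PySem.Set.contains_eq_listContains, beq_eq_decide]
    rw [hca]
    cases h1 : seen.contains x <;> cases h2 : (x == q.1) <;> simp
  rw [hfe]
  apply List.length_filter_lt_length_iff_exists.mpr
  refine ⟨q.1, ?_, by simp⟩
  simp only [List.mem_filter]
  exact ⟨pv_mem_adj_names graph node q hq, by simpa using hnm⟩

-- ===== PORT A =====
def dfs (graph : List (String × List (String × Int))) (valve_rates : List (String × Int)) (visit_times : List (String × Int)) (cur_node : String) : List (List (String × Int)) :=
  let cur_time := (visit_times.lookup cur_node).getD 0
  ((graph.lookup cur_node).getD []).attach.foldl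
    (fun ret p =>
      if (visit_times.lookup p.1.1).isNone && decide (p.1.2 + cur_time ≤ 26) then
        ret ++ dfs graph valve_rates (visit_times ++ [(p.1.1, p.1.2 + cur_time + 1)]) p.1.1
      else ret)
    [visit_times]
termination_by pvMeas graph visit_times
decreasing_by
  rename_i hcond
  have h1 : (visit_times.lookup p.1.1).isNone = true := by
    cases h : (visit_times.lookup p.1.1).isNone <;> simp [h] at hcond ⊢
  exact pvMeas_insert_lt graph cur_node visit_times p.1 _ p.2 h1

-- ===== PORT B =====
-- suffix paths of (valve, open-time) pairs, in pre-order (the inner 'paths' of Source B)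
def pvPaths (graph : List (String × List (String × Int))) (node : String) (now : Int)
    (seen : PySem.Set String) : List (List (String × Int)) :=
  [] :: ((graph.lookup node).getD []).attach.flatMap (fun p =>
    if !(PySem.Set.contains seen p.1.1) && decide (p.1.2 + now ≤ 26) then
      (pvPaths graph p.1.1 (p.1.2 + now + 1) (PySem.Set.add seen p.1.1)).map
        (fun rest => (p.1.1, p.1.2 + now + 1) :: rest)
    else [])
termination_by pvMeasB graph seen
decreasing_by
  rename_i hcond
  have h1 : PySem.Set.contains seen p.1.1 = false := by
    cases h : PySem.Set.contains seen p.1.1 with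
    | false => rfl
    | true =>
      exfalso
      simp only [Bool.and_eq_true, Bool.not_eq_true'] at hcond
      rw [h] at hcond
      simp at hcond
  exact pvMeasB_add_lt graph node seen p.1 p.2 h1

def dfs_alt (graph : List (String × List (String × Int))) (valve_rates : List (String × Int)) (visit_times : List (String × Int)) (cur_node : String) : List (List (String × Int)) :=
  (pvPaths graph cur_node ((visit_times.lookup cur_node).getD 0)
      (PySem.Set.ofList (visit_times.map Prod.fst))).map
    (fun p => visit_times ++ p)

-- ===== PRECONDITION & SPEC =====
-- Pre_ excludes inputs where cur_node is missing from visit_times or graph (A raises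
-- KeyError at once), inputs whose depth-1-entered neighbours are not graph keys (KeyError
-- on recursion), and -- only when some neighbour is entered at depth 1 -- graphs with an
-- adjacency name that is neither a graph key nor a visit_times key: past depth 1, whether
-- A's KeyError on such a dangling name fires depends on the traversal itself, so those
-- graphs are excluded even when A happens to return.
def Pre_dfs (graph : List (String × List (String × Int))) (valve_rates : List (String × Int)) (visit_times : List (String × Int)) (cur_node : String) : Prop :=
  (visit_times.lookup cur_node).isSome = true ∧ (graph.lookup cur_node).isSome = true ∧
  (∀ q ∈ (graph.lookup cur_node).getD [],
      ((visit_times.lookup q.1).isNone = true ∧ q.2 + (visit_times.lookup cur_node).getD 0 ≤ 26) →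
        (graph.lookup q.1).isSome = true) ∧
  ((∃ q ∈ (graph.lookup cur_node).getD [],
      (visit_times.lookup q.1).isNone = true ∧ q.2 + (visit_times.lookup cur_node).getD 0 ≤ 26) →
    ∀ p ∈ graph, ∀ q ∈ p.2, (graph.lookup q.1).isSome = true ∨ (visit_times.lookup q.1).isSome = true)
instance (graph : List (String × List (String × Int))) (valve_rates : List (String × Int)) (visit_times : List (String × Int)) (cur_node : String) : Decidable (Pre_dfs graph valve_rates visit_times cur_node) := by unfold Pre_dfs; infer_instance

def pvWitness_dfs : (List (String × List (String × Int))) × (List (String × Int)) × (List (String × Int)) × String :=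
  ([("a", [("b", (2 : Int))]), ("b", ([] : List (String × Int)))], ([] : List (String × Int)), [("a", (0 : Int))], "a")

def Spec_dfs (graph : List (String × List (String × Int))) (valve_rates : List (String × Int)) (visit_times : List (String × Int)) (cur_node : String) (out : List (List (String × Int))) : Prop := out = dfs_alt graph valve_rates visit_times cur_node
instance (graph : List (String × List (String × Int))) (valve_rates : List (String × Int)) (visit_times : List (String × Int)) (cur_node : String) (out : List (List (String × Int))) : Decidable (Spec_dfs graph valve_rates visit_times cur_node out) := by unfold Spec_dfs; infer_instance

-- ===== CLAIM (what is proved, stated in full; the proofs are below) =====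
def Claim_equal_dfs : Prop := ∀ (graph : List (String × List (String × Int))) (valve_rates : List (String × Int)) (visit_times : List (String × Int)) (cur_node : String), Dom_dfs graph valve_rates visit_times cur_node → Pre_dfs graph valve_rates visit_times cur_node → Spec_dfs graph valve_rates visit_times cur_node (dfs graph valve_rates visit_times cur_node)

-- ===== LEMMAS AND PROOFS =====

theorem pv_flatMap_attach {α β : Type} (l : List α) (f : α → List β) :
    l.attach.flatMap (fun x => f x.1) = l.flatMap f := by
  induction l with
  | nil => rfl
  | cons a t ih => simp [List.attach_cons, List.flatMap_map, ih]

theorem pv_flatMap_if {α β : Type} (l : List α) (c : α → Bool) (g : α → List β) :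
    l.flatMap (fun p => if c p then g p else []) = (l.filter c).flatMap g := by
  induction l with
  | nil => rfl
  | cons a t ih => cases h : c a <;> simp [h, ih]

theorem pv_flatMap_congr {α β : Type} (l : List α) (f g : α → List β)
    (h : ∀ e ∈ l, f e = g e) : l.flatMap f = l.flatMap g := by
  induction l with
  | nil => rfl
  | cons a t ih =>
    simp only [List.flatMap_cons]
    rw [h a (List.mem_cons_self ..), ih (fun e he => h e (List.mem_cons_of_mem _ he))]

-- A unfolded to a filter/flatMap shape
theorem pv_dfs_unfold (graph : List (String × List (String × Int))) (valve_rates : List (String × Int))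
    (vt : List (String × Int)) (node : String) :
    dfs graph valve_rates vt node =
      vt :: (((graph.lookup node).getD []).filter
          (fun p => (vt.lookup p.1).isNone && decide (p.2 + ((vt.lookup node).getD 0) ≤ 26))).flatMap
        (fun p => dfs graph valve_rates (vt ++ [(p.1, p.2 + ((vt.lookup node).getD 0) + 1)]) p.1) := by
  conv_lhs => rw [dfs]
  rw [List.foldl_attach (l := ((graph.lookup node).getD []))
      (f := fun (ret : List (List (String × Int))) (p : String × Int) =>
        if (vt.lookup p.1).isNone && decide (p.2 + ((vt.lookup node).getD 0) ≤ 26) then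
          ret ++ dfs graph valve_rates (vt ++ [(p.1, p.2 + ((vt.lookup node).getD 0) + 1)]) p.1
        else ret)
      (b := [vt])]
  have hstep : (fun (ret : List (List (String × Int))) (p : String × Int) =>
      if (vt.lookup p.1).isNone && decide (p.2 + ((vt.lookup node).getD 0) ≤ 26) then
        ret ++ dfs graph valve_rates (vt ++ [(p.1, p.2 + ((vt.lookup node).getD 0) + 1)]) p.1
      else ret)
      = (fun ret p => ret ++
          (if (vt.lookup p.1).isNone && decide (p.2 + ((vt.lookup node).getD 0) ≤ 26) then
            dfs graph valve_rates (vt ++ [(p.1, p.2 + ((vt.lookup node).getD 0) + 1)]) p.1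
          else [])) := by
    funext ret p
    by_cases h : ((vt.lookup p.1).isNone && decide (p.2 + ((vt.lookup node).getD 0) ≤ 26)) = true <;>
      simp [h]
  rw [hstep, PySem.List.foldl_append_eq_flatMap, pv_flatMap_if]
  rfl

-- B's path enumerator unfolded without attach
theorem pv_paths_unfold (graph : List (String × List (String × Int))) (node : String) (now : Int)
    (seen : PySem.Set String) :
    pvPaths graph node now seen =
      [] :: ((graph.lookup node).getD []).flatMap (fun p =>
        if !(PySem.Set.contains seen p.1) && decide (p.2 + now ≤ 26) then
          (pvPaths graph p.1 (p.2 + now + 1) (PySem.Set.add seen p.1)).map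
            (fun rest => (p.1, p.2 + now + 1) :: rest)
        else []) := by
  conv_lhs => rw [pvPaths]
  rw [pv_flatMap_attach (l := ((graph.lookup node).getD []))
      (f := fun p =>
        if !(PySem.Set.contains seen p.1) && decide (p.2 + now ≤ 26) then
          (pvPaths graph p.1 (p.2 + now + 1) (PySem.Set.add seen p.1)).map
            (fun rest => (p.1, p.2 + now + 1) :: rest)
        else [])]

theorem pv_lookup_append_self (vt : List (String × Int)) (k : String) (v : Int)
    (h : (vt.lookup k).isNone = true) : (vt ++ [(k, v)]).lookup k = some v := by
  induction vt with
  | nil => simp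
  | cons a t ih =>
    cases a with
    | mk a1 a2 =>
      simp only [List.lookup] at h
      simp only [List.cons_append, List.lookup]
      cases hk : (k == a1) with
      | true => rw [hk] at h; simp at h
      | false => rw [hk] at h; exact ih h

-- the main bridge: A's recursion equals (map of) B's path enumeration, under the
-- invariant that 'seen' holds exactly the keys of vt
theorem pv_main (graph : List (String × List (String × Int))) (valve_rates : List (String × Int)) :
    ∀ (n : Nat) (vt : List (String × Int)) (node : String) (seen : PySem.Set String),
      pvMeas graph vt ≤ n →
      (∀ s, PySem.Set.contains seen s = (vt.lookup s).isSome) →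
      dfs graph valve_rates vt node =
        (pvPaths graph node ((vt.lookup node).getD 0) seen).map (fun p => vt ++ p) := by
  intro n
  induction n using Nat.strong_induction_on with
  | _ n ih =>
    intro vt node seen hm hinv
    rw [pv_dfs_unfold, pv_paths_unfold]
    simp only [List.map_cons, List.append_nil, List.map_flatMap]
    congr 1
    rw [← pv_flatMap_if]
    apply pv_flatMap_congr
    intro p hp
    have hcond : (!(PySem.Set.contains seen p.1) && decide (p.2 + ((vt.lookup node).getD 0) ≤ 26))
        = ((vt.lookup p.1).isNone && decide (p.2 + ((vt.lookup node).getD 0) ≤ 26)) := by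
      rw [hinv p.1]
      cases (vt.lookup p.1) <;> simp
    by_cases hc : ((vt.lookup p.1).isNone && decide (p.2 + ((vt.lookup node).getD 0) ≤ 26)) = true
    · rw [hc] at hcond
      simp only [hc, hcond, if_pos]
      have hnone : (vt.lookup p.1).isNone = true := by
        cases h : (vt.lookup p.1).isNone
        · rw [h] at hc; simp at hc
        · rfl
      have hnotin : p.1 ∉ seen := by
        intro hmem
        have h4 := hinv p.1
        rw [(PySem.Set.contains_iff seen p.1).mpr hmem] at h4
        cases h5 : (vt.lookup p.1) with
        | none => rw [h5] at h4; simp at h4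
        | some w => rw [h5] at hnone; simp at hnone
      set t : Int := p.2 + ((vt.lookup node).getD 0) + 1 with ht
      have hlt : pvMeas graph (vt ++ [(p.1, t)]) < pvMeas graph vt :=
        pvMeas_insert_lt graph node vt p t hp hnone
      have hinv' : ∀ s, PySem.Set.contains (PySem.Set.add seen p.1) s
          = ((vt ++ [(p.1, t)]).lookup s).isSome := by
        intro s
        rw [PySem.Set.add_of_not_mem hnotin]
        have h2 := pv_lookup_append_isNone vt p.1 s t
        have h3 : ((vt ++ [(p.1, t)]).lookup s).isSome
            = ((vt.lookup s).isSome || (s == p.1)) := by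
          cases ha : ((vt ++ [(p.1, t)]).lookup s) <;> cases hb : (vt.lookup s) <;>
            cases hsp : (s == p.1) <;> simp [ha, hb, hsp] at h2 ⊢
        have hca : PySem.Set.contains (seen ++ [p.1]) s = (seen.contains s || s == p.1) := by
          simp [PySem.Set.contains_eq_listContains, beq_eq_decide]
        rw [hca, h3, ← hinv s]
      have hIH := ih (pvMeas graph (vt ++ [(p.1, t)])) (by omega) (vt ++ [(p.1, t)]) p.1
        (PySem.Set.add seen p.1) le_rfl hinv'
      have hlk : ((vt ++ [(p.1, t)]).lookup p.1).getD 0 = t := by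
        rw [pv_lookup_append_self vt p.1 t hnone]; rfl
      rw [hlk] at hIH
      rw [hIH, List.map_map]
      apply List.map_congr_left
      intro rest _
      simp
    · simp only [Bool.not_eq_true] at hc
      rw [hc] at hcond
      rw [hcond, hc]
      simp

-- a dict's key membership is lookup success
theorem pv_lookup_isSome_iff (vt : List (String × Int)) (s : String) :
    (vt.lookup s).isSome = true ↔ s ∈ vt.map Prod.fst := by
  induction vt with
  | nil => simp [List.lookup]
  | cons a t ih =>
    cases a with
    | mk a1 a2 =>
      simp only [List.lookup, List.map_cons, List.mem_cons]
      cases hk : (s == a1) with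
      | true =>
        simp [beq_iff_eq.mp hk]
      | false =>
        have hne : ¬ s = a1 := by
          intro he
          rw [he] at hk
          simp at hk
        simp [hne, ih]

-- 'seen' built by B from vt satisfies the invariant
theorem pv_ofList_keys_inv (vt : List (String × Int)) (s : String) :
    PySem.Set.contains (PySem.Set.ofList (vt.map Prod.fst)) s = (vt.lookup s).isSome := by
  cases hl : (vt.lookup s).isSome with
  | true =>
    exact (PySem.Set.contains_iff _ _).mpr
      ((PySem.Set.mem_ofList _ _).mpr ((pv_lookup_isSome_iff vt s).mp hl))
  | false =>
    cases hc : PySem.Set.contains (PySem.Set.ofList (vt.map Prod.fst)) s with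
    | false => rfl
    | true =>
      exfalso
      have hmem := (PySem.Set.contains_iff _ _).mp hc
      rw [PySem.Set.mem_ofList] at hmem
      rw [(pv_lookup_isSome_iff vt s).mpr hmem] at hl
      simp at hl

-- ===== VERDICT (by name: the statement is the Claim_ definition above) =====
theorem dfs_spec : Claim_equal_dfs := by
  intro graph valve_rates visit_times cur_node _ _
  unfold Spec_dfs dfs_alt
  exact pv_main graph valve_rates (pvMeas graph visit_times) visit_times cur_node
    (PySem.Set.ofList (visit_times.map Prod.fst)) le_rfl
    (pv_ofList_keys_inv visit_times)
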